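-- pv_equiv track=rewrite | github.com/special-place-administrator/symforge | execution/conventional_commits.py | is_conventional_subject
-- ===== SOURCE A (Python) =====
-- ALLOWED_TYPES = (
--     "build",
--     "chore",
--     "ci",
--     "docs",
--     "feat",
--     "fix",
--     "perf",
--     "refactor",
--     "revert",
--     "style",
--     "test",
-- )
--
-- def is_conventional_subject(subject: str) -> bool:
--     for commit_type in ALLOWED_TYPES:
--         if not subject.startswith(commit_type):
--             continue
--
--         remainder = subject[len(commit_type) :]
--         if remainder.startswith("("):
--             closing = remainder.find(")")
--             if closing <= 1:
--                 return False
--             remainder = remainder[closing + 1 :]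
--
--         if remainder.startswith("!"):
--             remainder = remainder[1:]
--
--         return remainder.startswith(": ") and len(remainder) > 2
--
--     return False
-- ===== SOURCE B (Python) =====
-- _ALLOWED = frozenset((
--     "build", "chore", "ci", "docs", "feat", "fix",
--     "perf", "refactor", "revert", "style", "test",
-- ))
--
--
-- def is_conventional_subject(subject: str) -> bool:
--     n = len(subject)
--     # scan the leading run of ASCII letters and look it up in the type set
--     w = 0
--     while w < n and ("a" <= subject[w] <= "z" or "A" <= subject[w] <= "Z"):
--         w += 1
--     if subject[:w] not in _ALLOWED:
--         return False
--     i = w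
--     if i < n and subject[i] == "(":
--         if i + 1 < n and subject[i + 1] == ")":
--             return False  # empty scope
--         j = i + 1
--         while j < n and subject[j] != ")":
--             j += 1
--         if j == n:
--             return False  # unclosed scope
--         i = j + 1
--     if i < n and subject[i] == "!":
--         i += 1
--     return i + 2 < n and subject[i] == ":" and subject[i + 1] == " "
-- ===== Notes on version B (the rewrite author's own statement) =====
-- stated objective: alternative
-- what changed: Replaces A's 11-iteration type-prefix loop (startswith per type, plus repeated slicing) by a single left-to-right cursor scan: the leading letter run is read once and looked up in a frozenset, then the optional scope, the optional bang marker and the colon-space-plus-one-char ending are consumed at character positions in one forward pass.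
import Mathlib
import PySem

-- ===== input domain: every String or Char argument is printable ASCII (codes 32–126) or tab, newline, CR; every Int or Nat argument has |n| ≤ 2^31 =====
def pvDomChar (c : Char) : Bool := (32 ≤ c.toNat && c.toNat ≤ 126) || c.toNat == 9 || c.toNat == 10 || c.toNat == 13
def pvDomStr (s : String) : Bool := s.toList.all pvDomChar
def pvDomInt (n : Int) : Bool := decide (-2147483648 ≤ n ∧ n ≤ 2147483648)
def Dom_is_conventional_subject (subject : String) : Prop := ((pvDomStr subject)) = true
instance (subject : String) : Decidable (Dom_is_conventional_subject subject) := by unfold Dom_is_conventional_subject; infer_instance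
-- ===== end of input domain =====

-- B replaces A's 11-way type-prefix loop by one scan of the leading letter run plus a set
-- lookup, and slicing by a single left-to-right cursor; objective: simpler/alternative.

-- ===== PORT A =====
def pvTypes : List (List Char) :=
  [['b','u','i','l','d'], ['c','h','o','r','e'], ['c','i'], ['d','o','c','s'],
   ['f','e','a','t'], ['f','i','x'], ['p','e','r','f'],
   ['r','e','f','a','c','t','o','r'], ['r','e','v','e','r','t'],
   ['s','t','y','l','e'], ['t','e','s','t']]

-- the code after "remainder = remainder[closing + 1:]" / the no-scope path
def pvFinish (remainder : List Char) : Bool :=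
  let r := if PySem.Chars.startswith remainder ['!'] then PySem.List.slice remainder (some 1) none else remainder
  PySem.Chars.startswith r [':', ' '] && decide ((2 : Int) < PySem.Chars.len r)

-- the loop body once "subject.startswith(commit_type)" held
def pvAfterType (remainder : List Char) : Bool :=
  if PySem.Chars.startswith remainder ['('] then
    let closing := PySem.Chars.find remainder [')']
    if closing ≤ 1 then false
    else pvFinish (PySem.List.slice remainder (some (closing + 1)) none)
  else pvFinish remainder

def pvLoop (subject : List Char) : List (List Char) → Bool
  | [] => false
  | t :: ts =>
    if ¬ PySem.Chars.startswith subject t then pvLoop subject ts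
    else pvAfterType (PySem.List.slice subject (some (PySem.Chars.len t)) none)

def is_conventional_subject (subject : String) : Bool :=
  pvLoop subject.toList pvTypes

-- ===== PORT B =====
def pvAllowed : PySem.Set (List Char) :=
  PySem.Set.ofList
    [['b','u','i','l','d'], ['c','h','o','r','e'], ['c','i'], ['d','o','c','s'],
     ['f','e','a','t'], ['f','i','x'], ['p','e','r','f'],
     ['r','e','f','a','c','t','o','r'], ['r','e','v','e','r','t'],
     ['s','t','y','l','e'], ['t','e','s','t']]

def altIsAlpha (c : Char) : Bool := ('a' ≤ c && c ≤ 'z') || ('A' ≤ c && c ≤ 'Z')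

-- the leading-letter-run scan ("while w < n and subject[w] is a letter")
def altWord : List Char → List Char
  | [] => []
  | c :: t => if altIsAlpha c then c :: altWord t else []

-- "while j < n and subject[j] != ')': j += 1"; some r = the rest after the ')'
def altScope : List Char → Option (List Char)
  | [] => none
  | c :: t => if c = ')' then some t else altScope t

-- "subject[i+1] == ')'" guard (empty scope)
def altHeadClose : List Char → Bool
  | [] => false
  | c :: _ => c = ')'

-- "i + 2 < n and subject[i] == ':' and subject[i+1] == ' '"
def altColon : List Char → Bool
  | a :: b :: _ :: _ => a = ':' && b = ' '
  | _ => false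

-- "if i < n and subject[i] == '!': i += 1" then the colon check
def altBang : List Char → Bool
  | c :: t => if c = '!' then altColon t else altColon (c :: t)
  | [] => altColon []

-- scope / bang / colon checks after the type word, moving one cursor forward
def altTail : List Char → Bool
  | c :: r1 =>
    if c = '(' then
      if altHeadClose r1 then false
      else
        match altScope r1 with
        | none => false
        | some r2 => altBang r2
    else altBang (c :: r1)
  | [] => altBang []

def is_conventional_subject_alt (subject : String) : Bool :=
  let cs := subject.toList
  let w := altWord cs
  if PySem.Set.contains pvAllowed w then altTail (cs.drop w.length) else false

-- ===== PRECONDITION & SPEC =====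
def Spec_is_conventional_subject (subject : String) (out : Bool) : Prop := out = is_conventional_subject_alt subject
instance (subject : String) (out : Bool) : Decidable (Spec_is_conventional_subject subject out) := by unfold Spec_is_conventional_subject; infer_instance

-- ===== CLAIM (what is proved, stated in full; the proofs are below) =====
def Claim_equal_is_conventional_subject : Prop := ∀ (subject : String), Dom_is_conventional_subject subject → Spec_is_conventional_subject subject (is_conventional_subject subject)

-- ===== LEMMAS AND PROOFS =====

theorem singleton_prefix_iff (c : Char) (l : List Char) : ([c] <+: l) ↔ l.head? = some c := by
  cases l <;> simp [List.cons_prefix_cons, eq_comm]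

theorem altWord_eq_takeWhile (cs : List Char) : altWord cs = cs.takeWhile altIsAlpha := by
  induction cs with
  | nil => rfl
  | cons c t ih => simp only [altWord, List.takeWhile]; split <;> simp_all

theorem find_eq_of {s sub : List Char} {k : Nat} (h1 : sub <+: s.drop k)
    (h2 : ∀ i < k, ¬ sub <+: s.drop i) : PySem.Chars.find s sub = k := by
  have hinf : sub <:+: s := h1.isInfix.trans (s.drop_suffix k).isInfix
  have hnn : 0 ≤ PySem.Chars.find s sub := (PySem.Chars.find_nonneg_iff s sub).mpr hinf
  obtain ⟨hp, hmin⟩ := PySem.Chars.find_spec hnn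
  have h3 : (PySem.Chars.find s sub).toNat ≤ k := by
    by_contra hlt
    exact (hmin k (by omega)) h1
  have h4 : k ≤ (PySem.Chars.find s sub).toNat := by
    by_contra hlt
    exact h2 _ (by omega) hp
  omega

theorem find_neg_of {s sub : List Char} (h : ¬ sub <:+: s) : PySem.Chars.find s sub = -1 :=
  (PySem.Chars.find_eq_neg_one_iff s sub).mpr h

theorem scope_main (r1 : List Char) :
    (PySem.Chars.find r1 [')'] = -1 ∧ altScope r1 = none) ∨
    (∃ k : Nat, PySem.Chars.find r1 [')'] = (k : Int) ∧ (r1.drop k).head? = some ')' ∧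
      (∀ i < k, (r1.drop i).head? ≠ some ')') ∧ altScope r1 = some (r1.drop (k + 1))) := by
  induction r1 with
  | nil =>
    left
    refine ⟨find_neg_of ?_, rfl⟩
    simp
  | cons c t ih =>
    by_cases hc : c = ')'
    · subst hc
      right
      refine ⟨0, find_eq_of ?_ (by omega), by simp, by omega, by simp [altScope]⟩
      simp
    · rcases ih with ⟨hf, hs⟩ | ⟨k, hf, hk, hmin, hs⟩
      · left
        constructor
        · apply find_neg_of
          have hmem : ')' ∉ t := by
            intro hm
            exact absurd hf (by simp [(PySem.Chars.find_ne_neg_one_iff t [')']).mpr ((List.singleton_infix_iff _ _).mpr hm)])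
          simp [List.singleton_infix_iff, hmem, Ne.symm hc]
        · simp [altScope, hc, hs]
      · right
        refine ⟨k + 1, ?_, by simpa using hk, ?_, ?_⟩
        · have := find_eq_of (s := c :: t) (sub := [')']) (k := k + 1)
            (by simpa [singleton_prefix_iff] using hk)
            (by
              intro i hi
              rw [singleton_prefix_iff]
              cases i with
              | zero => simp [hc]
              | succ j =>
                simp only [List.drop_succ_cons]
                exact hmin j (by omega))
          exact this
        · intro i hi
          cases i with
          | zero => simp [hc]
          | succ j => simpa using hmin j (by omega)
        · simp [altScope, hc, hs]

theorem colon_eq (r : List Char) :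
    (PySem.Chars.startswith r [':', ' '] && decide ((2 : Int) < PySem.Chars.len r)) = altColon r := by
  rcases r with _ | ⟨a, _ | ⟨b, _ | ⟨c, t⟩⟩⟩ <;>
    simp [altColon, PySem.Chars.startswith, List.isPrefixOf, PySem.Chars.len_eq]
  have h : (2 : Int) ≤ ↑t.length + 1 + 1 := by omega
  simp only [h, decide_true, Bool.and_true]
  by_cases ha : a = ':' <;> by_cases hb : b = ' '
  · simp [ha, hb]
  · simp [ha, hb]
    exact fun h' => hb h'.symm
  · simp [ha, hb]
    exact fun h' => ha h'.symm
  · simp [ha, hb]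
    exact fun h' => absurd h'.symm ha

theorem finish_eq (r : List Char) : pvFinish r = altBang r := by
  cases r with
  | nil => simp [pvFinish, altBang, ← colon_eq, PySem.Chars.startswith, List.isPrefixOf]
  | cons c t =>
    by_cases hc : c = '!'
    · subst hc
      simp [pvFinish, altBang, ← colon_eq, PySem.Chars.startswith, List.isPrefixOf,
        PySem.List.slice_from_one]
    · simp [pvFinish, altBang, ← colon_eq, PySem.Chars.startswith, List.isPrefixOf, hc,
        Ne.symm hc]

theorem tail_eq (r : List Char) : pvAfterType r = altTail r := by
  cases r with
  | nil => simp [pvAfterType, altTail, PySem.Chars.startswith, List.isPrefixOf, finish_eq]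
  | cons c r1 =>
    by_cases hc : c = '('
    · subst hc
      rcases scope_main ('(' :: r1) with ⟨hf, hs⟩ | ⟨k, hf, hk, hmin, hs⟩
      · have hs1 : altScope r1 = none := by simpa [altScope] using hs
        have hhc : altHeadClose r1 = false := by
          cases r1 with
          | nil => rfl
          | cons d t =>
            simp only [altHeadClose, decide_eq_false_iff_not]
            intro hd
            subst hd
            simp [altScope] at hs1
        simp [pvAfterType, altTail, PySem.Chars.startswith, List.isPrefixOf, hf, hhc, hs1]
      · have hk0 : k ≠ 0 := by
          intro h0; subst h0; simp at hk
        have hs1 : altScope r1 = some (r1.drop k) := by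
          obtain ⟨m, rfl⟩ : ∃ m, k = m + 1 := ⟨k - 1, by omega⟩
          simpa [altScope] using hs
        by_cases hk1 : k = 1
        · subst hk1
          have hr1 : altHeadClose r1 = true := by
            cases r1 with
            | nil => simp at hk
            | cons d t => simp_all [altHeadClose]
          simp [pvAfterType, altTail, PySem.Chars.startswith, List.isPrefixOf, hf, hr1]
        · have hk2 : 2 ≤ k := by omega
          have hr1 : altHeadClose r1 = false := by
            cases r1 with
            | nil => rfl
            | cons d t =>
              simp only [altHeadClose, decide_eq_false_iff_not]
              intro hd
              exact hmin 1 (by omega) (by simp [hd])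
          have hslice : PySem.List.slice ('(' :: r1) (some ((k : Int) + 1)) none
              = ('(' :: r1).drop (k + 1) := by
            have : ((k : Int) + 1) = ((k + 1 : Nat) : Int) := by push_cast; ring
            rw [this, PySem.List.slice_from_natCast]
          simp only [pvAfterType, altTail, PySem.Chars.startswith, List.isPrefixOf]
          simp [hf, hslice, hr1, hs1, finish_eq, show ¬ ((k : Int) ≤ 1) by exact_mod_cast (by omega : ¬ (k ≤ 1)), List.drop_succ_cons]
    · simp [pvAfterType, altTail, PySem.Chars.startswith, List.isPrefixOf, hc, Ne.symm hc,
        finish_eq]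

theorem afterType_alpha (c : Char) (r : List Char) (h : altIsAlpha c = true) :
    pvAfterType (c :: r) = false := by
  have h1 : c ≠ '(' := by rintro rfl; simp [altIsAlpha] at h
  have h2 : c ≠ '!' := by rintro rfl; simp [altIsAlpha] at h
  have h3 : c ≠ ':' := by rintro rfl; simp [altIsAlpha] at h
  simp [pvAfterType, pvFinish, PySem.Chars.startswith, List.isPrefixOf, Ne.symm h1, Ne.symm h2,
    Ne.symm h3]

theorem pvLoop_eq_false (cs : List Char) (ts : List (List Char))
    (h : ∀ t ∈ ts, PySem.Chars.startswith cs t = true →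
      pvAfterType (PySem.List.slice cs (some (PySem.Chars.len t)) none) = false) :
    pvLoop cs ts = false := by
  induction ts with
  | nil => rfl
  | cons t ts ih =>
    simp only [pvLoop]
    by_cases hs : PySem.Chars.startswith cs t = true
    · simp only [hs, not_true_eq_false, if_false]
      simpa using h t (by simp) hs
    · simp only [hs]
      simpa using ih fun u hu => h u (by simp [hu])

theorem word_extend (t : List Char) (cs : List Char) (hpre : t <+: cs)
    (halpha : ∀ c ∈ t, altIsAlpha c = true) (hne : t ≠ altWord cs) :
    ∃ c r, cs.drop t.length = c :: r ∧ altIsAlpha c = true := by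
  induction t generalizing cs with
  | nil =>
    cases cs with
    | nil => simp [altWord] at hne
    | cons c r =>
      by_cases hc : altIsAlpha c = true
      · exact ⟨c, r, by simp, hc⟩
      · simp [altWord, hc] at hne
  | cons a t' ih =>
    cases cs with
    | nil => simp at hpre
    | cons b cs' =>
      rw [List.cons_prefix_cons] at hpre
      obtain ⟨rfl, hpre'⟩ := hpre
      have ha : altIsAlpha a = true := halpha a (by simp)
      have hne' : t' ≠ altWord cs' := by
        intro hh
        exact hne (by simp [altWord, ha, hh])
      simpa using ih cs' hpre' (fun c hc => halpha c (by simp [hc])) hne'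

theorem pvLoop_of_type (t rest : List Char) (ht : t ∈ pvTypes) :
    pvLoop (t ++ rest) pvTypes = pvAfterType rest := by
  simp only [pvTypes, List.mem_cons, List.not_mem_nil, or_false] at ht
  rcases ht with rfl | rfl | rfl | rfl | rfl | rfl | rfl | rfl | rfl | rfl | rfl <;>
    simp [pvLoop, pvTypes, PySem.Chars.startswith, List.isPrefixOf, PySem.Chars.len] <;>
    simp [pysem]

theorem pvAllowed_eq : (pvAllowed : List (List Char)) = pvTypes := by rfl

theorem contains_iff_mem (w : List Char) :
    PySem.Set.contains pvAllowed w = true ↔ w ∈ pvTypes := by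
  unfold PySem.Set.contains
  rw [pvAllowed_eq]
  simp

theorem types_alpha : ∀ t ∈ pvTypes, ∀ c ∈ t, altIsAlpha c = true := by
  have h : pvTypes.all (fun t => t.all altIsAlpha) = true := by rfl
  simp only [List.all_eq_true] at h
  exact h

theorem main_eq (subject : String) :
    is_conventional_subject subject = is_conventional_subject_alt subject := by
  rw [show is_conventional_subject subject = pvLoop subject.toList pvTypes from rfl]
  rw [show is_conventional_subject_alt subject =
      (if PySem.Set.contains pvAllowed (altWord subject.toList) then
        altTail (subject.toList.drop (altWord subject.toList).length) else false) from rfl]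
  set cs := subject.toList with hcs
  by_cases hw : PySem.Set.contains pvAllowed (altWord cs) = true
  · have hmem : altWord cs ∈ pvTypes := (contains_iff_mem _).mp hw
    have hpre : altWord cs <+: cs := by
      rw [altWord_eq_takeWhile]; exact List.takeWhile_prefix _
    obtain ⟨rest, hrest⟩ := hpre
    set w := altWord cs with hwdef
    rw [if_pos hw, ← hrest, List.drop_left, ← tail_eq]
    exact pvLoop_of_type _ _ hmem
  · rw [if_neg hw]
    apply pvLoop_eq_false
    intro t ht hst
    have hpre : t <+: cs := (PySem.Chars.startswith_iff cs t).mp hst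
    have hne : t ≠ altWord cs := fun hl => hw (hl ▸ ((contains_iff_mem t).mpr ht))
    obtain ⟨c, r, hdropc, hca⟩ := word_extend t cs hpre (types_alpha t ht) hne
    have hslice : PySem.List.slice cs (some (PySem.Chars.len t)) none = cs.drop t.length := by
      simp
    rw [hslice, hdropc]
    exact afterType_alpha c r hca

-- ===== VERDICT (by name: the statement is the Claim_ definition above) =====
theorem is_conventional_subject_spec : Claim_equal_is_conventional_subject := by
  intro subject _
  unfold Spec_is_conventional_subject
  exact main_eq subject
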